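-- pv_equiv track=rewrite | github.com/pbitkowski/ci-rescue-action | src/main.py | _extract_error_context
-- ===== SOURCE A (Python) =====
-- def _extract_error_context(logs: str) -> str:
--     """Extract key error information from logs"""
--     if not logs:
--         return "No logs available"
--
--     error_indicators = [
--         "ERROR", "FAILED", "Error:", "error:", "Exception:", "Traceback",
--         "TabError:", "SyntaxError:", "ImportError:", "ModuleNotFoundError:",
--         "AssertionError:", "##[error]", "FAIL:", "FAILURE:", "Remove unused import:"
--     ]
--
--     lines = logs.split('\n')
--     error_lines = []
--
--     for line in lines:
--         if any(indicator in line for indicator in error_indicators):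
--             error_lines.append(line.strip())
--
--     if error_lines:
--         return "\n".join(error_lines[-5:])  # Last 5 error lines
--     else:
--         # Fallback to last few lines of logs
--         return "\n".join([line.strip() for line in lines[-10:] if line.strip()])
-- ===== SOURCE B (Python) =====
-- def _extract_error_context(logs: str) -> str:
--     """Extract key error information from logs"""
--     if not logs:
--         return "No logs available"
--
--     error_indicators = [
--         "ERROR", "FAILED", "Error:", "error:", "Exception:", "Traceback",
--         "TabError:", "SyntaxError:", "ImportError:", "ModuleNotFoundError:",
--         "AssertionError:", "##[error]", "FAIL:", "FAILURE:", "Remove unused import:"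
--     ]
--
--     lines = logs.split('\n')
--
--     # Reverse scan: gather at most the last 5 error lines, stopping early.
--     buf = []
--     for line in reversed(lines):
--         if any(indicator in line for indicator in error_indicators):
--             buf.append(line.strip())
--             if len(buf) == 5:
--                 break
--     if buf:
--         buf.reverse()
--         return "\n".join(buf)
--
--     # Fallback: reverse scan over at most the last 10 lines, keeping the
--     # non-empty stripped ones; stop once 10 lines have been consumed.
--     tail = []
--     count = 0
--     for line in reversed(lines):
--         count += 1
--         s = line.strip()
--         if s:
--             tail.append(s)
--         if count == 10:
--             break
--     tail.reverse()
--     return "\n".join(tail)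
-- ===== Notes on version B (the rewrite author's own statement) =====
-- stated objective: alternative
-- what changed: Replaces A's full forward filter pass plus [-5:]/[-10:] tail slices with a single reverse scan that maintains a bounded buffer and breaks early once 5 error lines (or 10 tail lines) are gathered, then reverses the buffer to restore source order.
import Mathlib
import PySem

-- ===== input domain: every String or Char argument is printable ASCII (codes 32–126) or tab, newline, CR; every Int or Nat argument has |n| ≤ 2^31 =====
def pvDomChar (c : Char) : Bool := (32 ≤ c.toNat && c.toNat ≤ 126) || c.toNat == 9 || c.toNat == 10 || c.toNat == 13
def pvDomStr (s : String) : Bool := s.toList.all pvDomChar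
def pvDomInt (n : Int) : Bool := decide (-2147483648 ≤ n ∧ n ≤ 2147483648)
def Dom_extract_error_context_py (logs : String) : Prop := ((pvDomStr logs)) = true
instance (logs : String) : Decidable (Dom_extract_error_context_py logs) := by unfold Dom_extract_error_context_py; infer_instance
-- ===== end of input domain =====

-- B replaces A's full forward filter pass plus [-5:]/[-10:] tail slices with a
-- bounded reverse scan that breaks early (alternative decomposition, same result).

-- ===== PORT A =====
def errorIndicators : List String :=
  ["ERROR", "FAILED", "Error:", "error:", "Exception:", "Traceback",
   "TabError:", "SyntaxError:", "ImportError:", "ModuleNotFoundError:",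
   "AssertionError:", "##[error]", "FAIL:", "FAILURE:", "Remove unused import:"]

-- any(indicator in line for indicator in error_indicators)
def hasIndicator (line : String) : Bool :=
  errorIndicators.any (fun ind => PySem.Str.isIn ind line)

def extract_error_context_py (logs : String) : String :=
  if logs = "" then "No logs available"
  else
    let lines := (PySem.Str.split? logs "\n").getD []
    let error_lines := lines.foldl
      (fun acc line => if hasIndicator line then acc ++ [PySem.Str.strip line] else acc) []
    if error_lines ≠ [] then
      PySem.Str.join "\n" (PySem.List.slice error_lines (some (-5)) none)
    else
      PySem.Str.join "\n"
        (((PySem.List.slice lines (some (-10)) none).map PySem.Str.strip).filter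
          (fun s => s ≠ ""))

-- ===== PORT B =====
-- reverse scan collecting matching stripped lines, break at 5
def collectErrRev : List String → List String → List String
  | [], buf => buf
  | line :: rest, buf =>
    if hasIndicator line then
      let buf' := buf ++ [PySem.Str.strip line]
      if buf'.length = 5 then buf' else collectErrRev rest buf'
    else collectErrRev rest buf

-- reverse scan keeping non-empty stripped lines, break after consuming 10 lines
def collectTailRev : List String → Nat → List String → List String
  | [], _, buf => buf
  | line :: rest, count, buf =>
    let count' := count + 1
    let s := PySem.Str.strip line
    let buf' := if s ≠ "" then buf ++ [s] else buf
    if count' = 10 then buf' else collectTailRev rest count' buf'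

def extract_error_context_py_alt (logs : String) : String :=
  if logs = "" then "No logs available"
  else
    let lines := (PySem.Str.split? logs "\n").getD []
    let buf := collectErrRev lines.reverse []
    if buf ≠ [] then PySem.Str.join "\n" buf.reverse
    else PySem.Str.join "\n" (collectTailRev lines.reverse 0 []).reverse

-- ===== PRECONDITION & SPEC =====
def Spec_extract_error_context_py (logs : String) (out : String) : Prop := out = extract_error_context_py_alt logs
instance (logs : String) (out : String) : Decidable (Spec_extract_error_context_py logs out) := by unfold Spec_extract_error_context_py; infer_instance

-- ===== CLAIM (what is proved, stated in full; the proofs are below) =====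
def Claim_equal_extract_error_context_py : Prop := ∀ (logs : String), Dom_extract_error_context_py logs → Spec_extract_error_context_py logs (extract_error_context_py logs)

-- ===== LEMMAS AND PROOFS =====

-- The bounded reverse error scan is "take (5 - |buf|) of filter-then-map".
theorem collectErrRev_eq (xs : List String) :
    ∀ buf : List String, buf.length < 5 →
      collectErrRev xs buf =
        buf ++ (((xs.filter hasIndicator).map PySem.Str.strip).take (5 - buf.length)) := by
  induction xs with
  | nil => intro buf _; simp [collectErrRev]
  | cons line rest ih =>
    intro buf hb
    by_cases h : hasIndicator line
    · simp only [collectErrRev, h, if_true, List.filter_cons, List.map_cons]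
      by_cases h5 : (buf ++ [PySem.Str.strip line]).length = 5
      · simp only [h5, if_true]
        have : 5 - buf.length = 1 := by simp at h5; omega
        simp [this]
      · simp only [h5, if_false]
        have hlt : (buf ++ [PySem.Str.strip line]).length < 5 := by simp at h5 ⊢; omega
        rw [ih _ hlt]
        have : 5 - buf.length = (5 - (buf ++ [PySem.Str.strip line]).length) + 1 := by
          simp at hlt ⊢; omega
        simp [this]
    · simp [collectErrRev, h, ih _ hb]

-- The bounded reverse tail scan is "filter nonempty of map strip of take (10 - count)".
theorem collectTailRev_eq (xs : List String) :
    ∀ (count : Nat) (buf : List String), count < 10 →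
      collectTailRev xs count buf =
        buf ++ (((xs.take (10 - count)).map PySem.Str.strip).filter (fun s => s ≠ "")) := by
  induction xs with
  | nil => intro count buf _; simp [collectTailRev]
  | cons line rest ih =>
    intro count buf hc
    simp only [collectTailRev]
    by_cases h10 : count + 1 = 10
    · have : 10 - count = 1 := by omega
      simp only [h10, if_true, this, List.take_succ_cons, List.take_zero, List.map_cons,
        List.map_nil, List.filter_cons, List.filter_nil]
      by_cases hs : PySem.Str.strip line ≠ "" <;> simp [hs]
    · have hlt : count + 1 < 10 := by omega
      rw [if_neg h10, ih _ _ hlt]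
      have : 10 - count = (10 - (count + 1)) + 1 := by omega
      simp only [this, List.take_succ_cons, List.map_cons, List.filter_cons]
      by_cases hs : PySem.Str.strip line ≠ "" <;> simp [hs]

-- last k of xs as reverse ∘ take k ∘ reverse
theorem drop_length_sub_eq (xs : List String) (k : Nat) :
    xs.drop (xs.length - k) = (xs.reverse.take k).reverse := by
  rw [List.reverse_take]
  simp

-- ===== VERDICT (by name: the statement is the Claim_ definition above) =====
theorem extract_error_context_py_spec : Claim_equal_extract_error_context_py := by
  intro logs _
  unfold Spec_extract_error_context_py extract_error_context_py extract_error_context_py_alt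
  by_cases hz : logs = ""
  · simp [hz]
  · simp only [hz, if_false]
    set lines := (PySem.Str.split? logs "\n").getD [] with hl
    rw [PySem.List.foldl_append_if]
    rw [collectErrRev_eq lines.reverse [] (by simp)]
    simp only [List.nil_append, List.filter_reverse, List.map_reverse]
    set E := (lines.filter hasIndicator).map PySem.Str.strip with hE
    by_cases hne : E = []
    · simp only [hne, List.reverse_nil, List.take_nil, ne_eq, not_true_eq_false, if_false]
      rw [collectTailRev_eq lines.reverse 0 [] (by omega)]
      rw [PySem.List.slice_from_neg_ofNat lines 10 (by omega)]
      rw [drop_length_sub_eq]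
      simp
    · have h2 : E.reverse.take (5 - ([] : List String).length) ≠ [] := by
        simp [List.take_eq_nil_iff, hne]
      rw [if_pos hne, if_pos h2]
      rw [PySem.List.slice_from_neg_ofNat E 5 (by omega)]
      rw [drop_length_sub_eq]
      simp
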